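-- pv_equiv track=rewrite | github.com/DanielWarg/Alice | server/memory.py | _chunk_text_semantically
-- ===== SOURCE A (Python) =====
-- from typing import Optional, List, Dict, Any
--
-- def _chunk_text_semantically(text: str, max_chunk_size: int = 500) -> List[str]:
--     """Smart text chunking that preserves semantic boundaries"""
--     if len(text) <= max_chunk_size:
--         return [text]
--
--     chunks = []
--     # First split by double newlines (paragraphs)
--     paragraphs = text.split('\n\n')
--
--     current_chunk = ""
--     for paragraph in paragraphs:
--         # If paragraph alone is too long, split by sentences
--         if len(paragraph) > max_chunk_size:
--             # Split by sentence endings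
--             sentences = []
--             for delimiter in ['. ', '! ', '? ', '.\n', '!\n', '?\n']:
--                 if delimiter in paragraph:
--                     parts = paragraph.split(delimiter)
--                     for i, part in enumerate(parts[:-1]):
--                         sentences.append(part + delimiter.strip())
--                     if parts[-1].strip():
--                         sentences.append(parts[-1])
--                     break
--             else:
--                 # No sentence delimiters found, split by length
--                 sentences = [paragraph[i:i+max_chunk_size]
--                            for i in range(0, len(paragraph), max_chunk_size)]
--
--             # Process sentences
--             for sentence in sentences:
--                 if len(current_chunk) + len(sentence) > max_chunk_size:
--                     if current_chunk.strip():
--                         chunks.append(current_chunk.strip())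
--                     current_chunk = sentence
--                 else:
--                     current_chunk += (' ' if current_chunk else '') + sentence
--         else:
--             # Normal paragraph processing
--             if len(current_chunk) + len(paragraph) > max_chunk_size:
--                 if current_chunk.strip():
--                     chunks.append(current_chunk.strip())
--                 current_chunk = paragraph
--             else:
--                 current_chunk += ('\n\n' if current_chunk else '') + paragraph
--
--     if current_chunk.strip():
--         chunks.append(current_chunk.strip())
--
--     return chunks if chunks else [text]
-- ===== SOURCE B (Python) =====
-- from typing import Optional, List, Dict, Any
--
-- def _sentences(paragraph, max_chunk_size):
--     for d in ('. ', '! ', '? ', '.\n', '!\n', '?\n'):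
--         if d in paragraph:
--             parts = paragraph.split(d)
--             tail = [parts[-1]] if parts[-1].strip() else []
--             return [p + d.strip() for p in parts[:-1]] + tail
--     return [paragraph[i:i+max_chunk_size]
--             for i in range(0, len(paragraph), max_chunk_size)]
--
-- def _units(text, mx):
--     out = []
--     for p in text.split('\n\n'):
--         if len(p) > mx:
--             out += [(' ', s) for s in _sentences(p, mx)]
--         else:
--             out.append(('\n\n', p))
--     return out
--
-- def _group_by_length(units, mx):
--     """Partition units into groups using a length-only scan (no strings built here)."""
--     groups = []
--     cur = []
--     cur_len = 0
--     for sep, u in units: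
--         if cur_len + len(u) > mx:
--             groups.append(cur)
--             cur = [(sep, u)]
--             cur_len = len(u)
--         else:
--             cur.append((sep, u))
--             cur_len += len(u) + (len(sep) if cur_len else 0)
--     groups.append(cur)
--     return groups
--
-- def _join(group):
--     s = ""
--     for sep, u in group:
--         s += (sep if s else '') + u
--     return s
--
-- def _chunk_text_semantically(text: str, max_chunk_size: int = 500) -> List[str]:
--     """Staged chunking: flatten to (sep, unit) pairs, partition them into groups by a
--     length-only scan, then join each group and drop whitespace-only chunks."""
--     if len(text) <= max_chunk_size:
--         return [text]
--     groups = _group_by_length(_units(text, max_chunk_size), max_chunk_size)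
--     chunks = [c for c in (_join(g).strip() for g in groups) if c]
--     return chunks if chunks else [text]
-- ===== Notes on version B (the rewrite author's own statement) =====
-- stated objective: alternative
-- what changed: A builds chunk strings on the fly inside two nested branch-specific loops that each duplicate the flush/strip/append logic; B works in three separate stages: flatten the text to a (separator, unit) pair stream, partition that stream into groups using a length-only arithmetic scan that builds no strings, then join each group and filter out whitespace-only chunks at the end.
-- outside the precondition, e.g. on _chunk_text_semantically('abc', 0): A raises ValueError, B raises ValueError
import Mathlib
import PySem

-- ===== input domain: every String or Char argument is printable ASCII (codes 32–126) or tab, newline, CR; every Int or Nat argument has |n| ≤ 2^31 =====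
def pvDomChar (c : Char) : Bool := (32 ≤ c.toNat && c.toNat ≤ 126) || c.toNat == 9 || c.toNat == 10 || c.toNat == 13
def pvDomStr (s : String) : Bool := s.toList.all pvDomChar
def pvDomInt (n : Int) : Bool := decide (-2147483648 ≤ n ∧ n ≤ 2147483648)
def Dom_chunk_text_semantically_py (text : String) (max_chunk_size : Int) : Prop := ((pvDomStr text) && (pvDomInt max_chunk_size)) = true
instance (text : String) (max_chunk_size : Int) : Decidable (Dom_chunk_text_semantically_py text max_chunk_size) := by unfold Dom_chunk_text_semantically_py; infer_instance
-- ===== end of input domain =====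

-- B replaces A's interleaved string-building loops by three staged passes: flatten to
-- (separator, unit) pairs, partition them with a length-only scan (no strings built),
-- then join each group and drop whitespace-only chunks; alternative decomposition.

-- ===== PORT A =====
-- the six sentence delimiters, as lists of chars
def pvDelims : List (List Char) :=
  [['.', ' '], ['!', ' '], ['?', ' '], ['.', '\n'], ['!', '\n'], ['?', '\n']]

-- A's inner `for delimiter in [...]: if delimiter in paragraph: ...; break / else: length slices`
def pvCascade (p : List Char) (mx : Int) : List (List Char) → List (List Char)
  | [] => (PySem.List.pyRange 0 (p.length : Int) mx).map
            (fun i => PySem.List.slice p (some i) (some (i + mx)))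
  | d :: rest =>
    if PySem.Chars.isIn d p then
      let parts := PySem.Chars.splitOn p d
      let sents := parts.dropLast.map (fun part => part ++ PySem.Chars.strip d)
      if PySem.Chars.strip (parts.getLastD []) ≠ [] then sents ++ [parts.getLastD []] else sents
    else pvCascade p mx rest

def chunk_text_semantically_py (text : String) (max_chunk_size : Int) : List String :=
  let cs := text.toList
  if (cs.length : Int) ≤ max_chunk_size then [text] else
  let paragraphs := PySem.Chars.splitOn cs ['\n', '\n']
  let st := paragraphs.foldl (fun (st : List (List Char) × List Char) p =>
    if (p.length : Int) > max_chunk_size then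
      (pvCascade p max_chunk_size pvDelims).foldl (fun st s =>
        if (st.2.length : Int) + (s.length : Int) > max_chunk_size then
          (if PySem.Chars.strip st.2 ≠ [] then st.1 ++ [PySem.Chars.strip st.2] else st.1, s)
        else (st.1, st.2 ++ (if st.2 ≠ [] then [' '] else []) ++ s)) st
    else
      if (st.2.length : Int) + (p.length : Int) > max_chunk_size then
        (if PySem.Chars.strip st.2 ≠ [] then st.1 ++ [PySem.Chars.strip st.2] else st.1, p)
      else (st.1, st.2 ++ (if st.2 ≠ [] then ['\n', '\n'] else []) ++ p)) ([], [])
  let chunks := if PySem.Chars.strip st.2 ≠ [] then st.1 ++ [PySem.Chars.strip st.2] else st.1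
  if chunks ≠ [] then chunks.map (fun c => String.ofList c) else [text]

-- ===== PORT B =====
-- Source B's `_sentences`: same cascade, tail list computed first
def pvSentGo (p : List Char) (mx : Int) : List (List Char) → List (List Char)
  | [] => (PySem.List.pyRange 0 (p.length : Int) mx).map
            (fun i => PySem.List.slice p (some i) (some (i + mx)))
  | d :: rest =>
    if PySem.Chars.isIn d p then
      let parts := PySem.Chars.splitOn p d
      let tail := if PySem.Chars.strip (parts.getLastD []) ≠ [] then [parts.getLastD []] else []
      parts.dropLast.map (fun q => q ++ PySem.Chars.strip d) ++ tail
    else pvSentGo p mx rest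

-- Source B's `_units`: the flat (separator, unit) stream
def pvUnits (cs : List Char) (mx : Int) : List (List Char × List Char) :=
  (PySem.Chars.splitOn cs ['\n', '\n']).foldl (fun out p =>
    if (p.length : Int) > mx then out ++ (pvSentGo p mx pvDelims).map (fun s => ([' '], s))
    else out ++ [(['\n', '\n'], p)]) []

-- Source B's `_group_by_length` loop body; state = (groups, cur, cur_len)
def pvGroupStep (mx : Int)
    (st : List (List (List Char × List Char)) × List (List Char × List Char) × Int)
    (su : List Char × List Char) :
    List (List (List Char × List Char)) × List (List Char × List Char) × Int :=
  if st.2.2 + (su.2.length : Int) > mx then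
    (st.1 ++ [st.2.1], [su], (su.2.length : Int))
  else
    (st.1, st.2.1 ++ [su],
     st.2.2 + (su.2.length : Int) + (if st.2.2 ≠ 0 then (su.1.length : Int) else 0))

-- Source B's `_join`
def pvJoin (g : List (List Char × List Char)) : List Char :=
  g.foldl (fun s su => s ++ (if s ≠ [] then su.1 else []) ++ su.2) []

def chunk_text_semantically_py_alt (text : String) (max_chunk_size : Int) : List String :=
  let cs := text.toList
  if (cs.length : Int) ≤ max_chunk_size then [text] else
  let st := (pvUnits cs max_chunk_size).foldl (pvGroupStep max_chunk_size) ([], [], 0)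
  let groups := st.1 ++ [st.2.1]
  let chunks := ((groups.map pvJoin).map PySem.Chars.strip).filter (fun c => c ≠ [])
  if chunks ≠ [] then chunks.map (fun c => String.ofList c) else [text]

-- ===== PRECONDITION & SPEC =====
-- Pre_ excludes exactly the inputs where A raises ValueError (range(0, len, 0) with step 0):
-- max_chunk_size = 0, a nonempty text, and some nonempty paragraph containing none of the
-- six sentence delimiters.
def Pre_chunk_text_semantically_py (text : String) (max_chunk_size : Int) : Prop :=
  max_chunk_size = 0 →
    (text.toList.length : Int) ≤ 0 ∨
      ∀ p ∈ PySem.Chars.splitOn text.toList ['\n', '\n'],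
        p = [] ∨ ((([['.', ' '], ['!', ' '], ['?', ' '], ['.', '\n'], ['!', '\n'], ['?', '\n']] : List (List Char)).any
                    (fun d => PySem.Chars.isIn d p)) = true)
instance (text : String) (max_chunk_size : Int) : Decidable (Pre_chunk_text_semantically_py text max_chunk_size) := by
  unfold Pre_chunk_text_semantically_py; infer_instance

def pvWitness_chunk_text_semantically_py : String × Int := ("ab. cd! e", 4)

def Spec_chunk_text_semantically_py (text : String) (max_chunk_size : Int) (out : List String) : Prop := out = chunk_text_semantically_py_alt text max_chunk_size
instance (text : String) (max_chunk_size : Int) (out : List String) : Decidable (Spec_chunk_text_semantically_py text max_chunk_size out) := by unfold Spec_chunk_text_semantically_py; infer_instance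

-- ===== CLAIM (what is proved, stated in full; the proofs are below) =====
def Claim_equal_chunk_text_semantically_py : Prop := ∀ (text : String) (max_chunk_size : Int), Dom_chunk_text_semantically_py text max_chunk_size → Pre_chunk_text_semantically_py text max_chunk_size → Spec_chunk_text_semantically_py text max_chunk_size (chunk_text_semantically_py text max_chunk_size)

-- ===== LEMMAS AND PROOFS =====
theorem pv_witness_ok :
    Dom_chunk_text_semantically_py pvWitness_chunk_text_semantically_py.1 pvWitness_chunk_text_semantically_py.2 ∧
    Pre_chunk_text_semantically_py pvWitness_chunk_text_semantically_py.1 pvWitness_chunk_text_semantically_py.2 := by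
  decide

-- Source B's sentence splitter returns exactly A's cascade
theorem pv_sentGo_eq_cascade (p : List Char) (mx : Int) (ds : List (List Char)) :
    pvSentGo p mx ds = pvCascade p mx ds := by
  induction ds with
  | nil => rfl
  | cons d rest ih =>
    simp only [pvSentGo, pvCascade, ih]
    split_ifs with h1 h2 <;> simp

-- the unit stream as a flatMap
theorem pv_units_flatMap (cs : List Char) (mx : Int) :
    pvUnits cs mx = (PySem.Chars.splitOn cs ['\n', '\n']).flatMap (fun p =>
      if (p.length : Int) > mx then (pvCascade p mx pvDelims).map (fun s => ([' '], s))
      else [(['\n', '\n'], p)]) := by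
  unfold pvUnits
  rw [show (fun (out : List (List Char × List Char)) p =>
      if (p.length : Int) > mx then out ++ (pvSentGo p mx pvDelims).map (fun s => (([' '] : List Char), s))
      else out ++ [((['\n', '\n'] : List Char), p)]) =
    (fun out p => out ++ (if (p.length : Int) > mx
      then (pvCascade p mx pvDelims).map (fun s => (([' '] : List Char), s))
      else [((['\n', '\n'] : List Char), p)])) from ?_]
  · rw [PySem.List.foldl_append_eq_flatMap]; simp
  · funext out p; split_ifs with h <;> simp [pv_sentGo_eq_cascade]

-- A's per-unit packing step (the body both of A's branches share, with the unit's separator)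
def pvStepA (mx : Int) (st : List (List Char) × List Char) (su : List Char × List Char) :
    List (List Char) × List Char :=
  if (st.2.length : Int) + (su.2.length : Int) > mx then
    (if PySem.Chars.strip st.2 ≠ [] then st.1 ++ [PySem.Chars.strip st.2] else st.1, su.2)
  else (st.1, st.2 ++ (if st.2 ≠ [] then su.1 else []) ++ su.2)

-- folding a step over a flatMap = the nested fold A performs
theorem pv_foldl_flatMap {α β γ : Type} (g : α → List β) (f : γ → β → γ) (l : List α) (init : γ) :
    (l.flatMap g).foldl f init = l.foldl (fun st p => (g p).foldl f st) init := by
  induction l generalizing init with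
  | nil => rfl
  | cons a l ih => simp [List.flatMap_cons, List.foldl_append, ih]

-- A's nested paragraph/sentence fold = one fold of pvStepA over the unit stream
theorem pv_A_fold_units (mx : Int) (cs : List Char) (init : List (List Char) × List Char) :
    (pvUnits cs mx).foldl (pvStepA mx) init =
    (PySem.Chars.splitOn cs ['\n', '\n']).foldl (fun (st : List (List Char) × List Char) p =>
      if (p.length : Int) > mx then
        (pvCascade p mx pvDelims).foldl (fun st s =>
          if (st.2.length : Int) + (s.length : Int) > mx then
            (if PySem.Chars.strip st.2 ≠ [] then st.1 ++ [PySem.Chars.strip st.2] else st.1, s)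
          else (st.1, st.2 ++ (if st.2 ≠ [] then [' '] else []) ++ s)) st
      else
        if (st.2.length : Int) + (p.length : Int) > mx then
          (if PySem.Chars.strip st.2 ≠ [] then st.1 ++ [PySem.Chars.strip st.2] else st.1, p)
        else (st.1, st.2 ++ (if st.2 ≠ [] then ['\n', '\n'] else []) ++ p)) init := by
  rw [pv_units_flatMap, pv_foldl_flatMap]
  congr 1
  funext st p
  by_cases hp : (p.length : Int) > mx
  · simp [hp, List.foldl_map, pvStepA]
  · simp [hp, pvStepA]

-- joins over appends
theorem pv_join_concat (g : List (List Char × List Char)) (su : List Char × List Char) :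
    pvJoin (g ++ [su]) = pvJoin g ++ (if pvJoin g ≠ [] then su.1 else []) ++ su.2 := by
  simp [pvJoin, List.foldl_append]

theorem pv_join_single (su : List Char × List Char) : pvJoin [su] = su.2 := by
  simp [pvJoin]

-- the final strip/filter pass over an appended group
def pvFiltered (gs : List (List (List Char × List Char))) : List (List Char) :=
  ((gs.map pvJoin).map PySem.Chars.strip).filter (fun c => c ≠ [])

theorem pv_filtered_concat (gs : List (List (List Char × List Char)))
    (g : List (List Char × List Char)) :
    pvFiltered (gs ++ [g]) =
      pvFiltered gs ++ (if PySem.Chars.strip (pvJoin g) ≠ [] then [PySem.Chars.strip (pvJoin g)] else []) := by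
  simp only [pvFiltered, List.map_append, List.map_cons, List.map_nil, List.filter_append]
  split_ifs with h <;> simp [List.filter, h]

-- the simulation invariant: B's length-only grouping scan tracks A's string-building scan
theorem pv_sim (mx : Int) (us : List (List Char × List Char)) :
    ∀ (gs : List (List (List Char × List Char))) (cur : List (List Char × List Char)),
    us.foldl (pvStepA mx) (pvFiltered gs, pvJoin cur) =
      (pvFiltered ((us.foldl (pvGroupStep mx) (gs, cur, ((pvJoin cur).length : Int))).1),
       pvJoin ((us.foldl (pvGroupStep mx) (gs, cur, ((pvJoin cur).length : Int))).2.1)) ∧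
    (us.foldl (pvGroupStep mx) (gs, cur, ((pvJoin cur).length : Int))).2.2 =
      ((pvJoin ((us.foldl (pvGroupStep mx) (gs, cur, ((pvJoin cur).length : Int))).2.1)).length : Int) := by
  induction us with
  | nil => intro gs cur; exact ⟨rfl, rfl⟩
  | cons su us ih =>
    intro gs cur
    simp only [List.foldl_cons]
    by_cases h : ((pvJoin cur).length : Int) + (su.2.length : Int) > mx
    · have hA : pvStepA mx (pvFiltered gs, pvJoin cur) su =
          (pvFiltered (gs ++ [cur]), pvJoin [su]) := by
        simp only [pvStepA, if_pos h, pv_filtered_concat, pv_join_single]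
        split_ifs <;> simp_all
      have hB : pvGroupStep mx (gs, cur, ((pvJoin cur).length : Int)) su =
          (gs ++ [cur], [su], ((pvJoin [su]).length : Int)) := by
        simp [pvGroupStep, if_pos h, pv_join_single]
      rw [hA, hB]; exact ih (gs ++ [cur]) [su]
    · have hne : (pvJoin cur ≠ []) ↔ (((pvJoin cur).length : Int) ≠ 0) := by
        constructor
        · intro hc hl; exact hc (List.length_eq_zero_iff.mp (by exact_mod_cast hl))
        · intro hl hc; exact hl (by simp [hc])
      have hA : pvStepA mx (pvFiltered gs, pvJoin cur) su =
          (pvFiltered gs, pvJoin (cur ++ [su])) := by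
        simp only [pvStepA, if_neg h, pv_join_concat]
      have hB : pvGroupStep mx (gs, cur, ((pvJoin cur).length : Int)) su =
          (gs, cur ++ [su], ((pvJoin (cur ++ [su])).length : Int)) := by
        simp only [pvGroupStep, if_neg h, pv_join_concat]
        by_cases hc : pvJoin cur ≠ []
        · simp only [if_pos (hne.mp hc), if_pos hc, Prod.mk.injEq, true_and,
            List.length_append]
          push_cast; ring
        · have hc' : pvJoin cur = [] := not_not.mp hc
          simp [hc']
      rw [hA, hB]; exact ih gs (cur ++ [su])

-- ===== VERDICT (by name: the statement is the Claim_ definition above) =====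
theorem chunk_text_semantically_py_spec : Claim_equal_chunk_text_semantically_py := by
  intro text mx _ _
  unfold Spec_chunk_text_semantically_py
  simp only [chunk_text_semantically_py, chunk_text_semantically_py_alt]
  by_cases hlen : ((text.toList.length : Int) ≤ mx)
  · rw [if_pos hlen, if_pos hlen]
  · rw [if_neg hlen, if_neg hlen]
    rw [← pv_A_fold_units mx text.toList ([], [])]
    obtain ⟨h1, -⟩ := pv_sim mx (pvUnits text.toList mx) [] []
    have h0 : pvFiltered [] = [] := rfl
    have hj : pvJoin [] = [] := rfl
    rw [h0, hj] at h1
    simp only [List.length_nil, Nat.cast_zero] at h1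
    rw [h1, ← pvFiltered, pv_filtered_concat]
    split_ifs <;> simp_all [pvFiltered]
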